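-- pv_equiv track=rewrite | github.com/raysteven/PBDA_Variant_Vault | _pipeline/PBTK/data_manipulation.py | generate_variant_rules
-- ===== SOURCE A (Python) =====
-- def generate_variant_rules(alleles, current_genotype=''):
--     if not alleles:
--         return [current_genotype]
--
--     first_gene_alleles = alleles[0]
--     remaining_genes = alleles[1:]
--     genotypes = []
--
--     for allele in first_gene_alleles:
--         next_genotype = current_genotype + '/' + allele if current_genotype else allele
--         genotypes.extend(generate_variant_rules(remaining_genes, next_genotype))
--
--     return genotypes
-- ===== SOURCE B (Python) =====
-- def generate_variant_rules(alleles, current_genotype=''):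
--     genotypes = [current_genotype]
--     for gene in alleles:
--         genotypes = [(g + '/' + a) if g else a for g in genotypes for a in gene]
--     return genotypes
-- ===== Notes on version B (the rewrite author's own statement) =====
-- stated objective: simpler
-- what changed: Replaced the recursion with an iterative left fold: start from [current_genotype] and expand the genotype list by one comprehension per gene, no recursion and no list.extend.
import Mathlib
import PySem

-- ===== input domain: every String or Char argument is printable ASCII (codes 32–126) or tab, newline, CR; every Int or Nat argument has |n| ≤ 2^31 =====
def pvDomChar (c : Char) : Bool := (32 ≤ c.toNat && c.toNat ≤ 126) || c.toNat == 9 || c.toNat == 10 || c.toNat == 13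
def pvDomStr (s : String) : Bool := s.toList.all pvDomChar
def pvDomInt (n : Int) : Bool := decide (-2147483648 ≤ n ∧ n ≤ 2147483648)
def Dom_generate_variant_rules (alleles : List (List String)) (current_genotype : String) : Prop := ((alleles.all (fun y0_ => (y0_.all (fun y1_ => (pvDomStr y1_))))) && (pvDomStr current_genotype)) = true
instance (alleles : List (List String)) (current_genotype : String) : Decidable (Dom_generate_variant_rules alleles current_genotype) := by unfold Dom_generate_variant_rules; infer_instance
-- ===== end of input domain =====

-- B replaces A's recursion by an iterative left fold expanding the genotype list gene by gene (objective: simpler).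

-- ===== PORT A =====
-- Literal port of A: recursion on the gene list, inner loop over the first gene's
-- alleles accumulating `genotypes` via extend (ported as foldl with ++).
def generate_variant_rules (alleles : List (List String)) (current_genotype : String) : List String :=
  match alleles with
  | [] => [current_genotype]
  | first_gene_alleles :: remaining_genes =>
    first_gene_alleles.foldl
      (fun genotypes allele =>
        genotypes ++ generate_variant_rules remaining_genes
          (if current_genotype ≠ "" then current_genotype ++ "/" ++ allele else allele))
      []

-- ===== PORT B =====
-- Literal port of B: foldl over the gene lists, comprehension = flatMap/map.
def generate_variant_rules_alt (alleles : List (List String)) (current_genotype : String) : List String :=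
  alleles.foldl
    (fun genotypes gene =>
      genotypes.flatMap (fun g => gene.map (fun a => if g ≠ "" then g ++ "/" ++ a else a)))
    [current_genotype]

-- ===== PRECONDITION & SPEC =====
def Spec_generate_variant_rules (alleles : List (List String)) (current_genotype : String) (out : List String) : Prop := out = generate_variant_rules_alt alleles current_genotype
instance (alleles : List (List String)) (current_genotype : String) (out : List String) : Decidable (Spec_generate_variant_rules alleles current_genotype out) := by unfold Spec_generate_variant_rules; infer_instance

-- ===== CLAIM (what is proved, stated in full; the proofs are below) =====
def Claim_equal_generate_variant_rules : Prop := ∀ (alleles : List (List String)) (current_genotype : String), Dom_generate_variant_rules alleles current_genotype → Spec_generate_variant_rules alleles current_genotype (generate_variant_rules alleles current_genotype)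

-- ===== LEMMAS AND PROOFS =====

-- B's one-gene step.
def pvStep (genotypes : List String) (gene : List String) : List String :=
  genotypes.flatMap (fun g => gene.map (fun a => if g ≠ "" then g ++ "/" ++ a else a))

theorem pvAlt_eq_foldl (alleles : List (List String)) (cur : String) :
    generate_variant_rules_alt alleles cur = alleles.foldl pvStep [cur] := rfl

-- The fold is a homomorphism for ++ of starting genotype lists.
theorem pvFoldl_append (rest : List (List String)) :
    ∀ gs1 gs2 : List String,
      rest.foldl pvStep (gs1 ++ gs2) = rest.foldl pvStep gs1 ++ rest.foldl pvStep gs2 := by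
  induction rest with
  | nil => intro gs1 gs2; rfl
  | cons a rest ih =>
    intro gs1 gs2
    simp only [List.foldl_cons]
    rw [show pvStep (gs1 ++ gs2) a = pvStep gs1 a ++ pvStep gs2 a by
      simp [pvStep, List.flatMap_append], ih]

-- Hence the fold distributes over an arbitrary starting genotype list.
theorem pvFoldl_flatMap (rest : List (List String)) :
    ∀ gs : List String,
      rest.foldl pvStep gs = gs.flatMap (fun g => rest.foldl pvStep [g]) := by
  intro gs
  induction gs with
  | nil =>
    induction rest with
    | nil => rfl
    | cons a rest ih => simpa [List.foldl_cons, pvStep] using ih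
  | cons g gs ih =>
    rw [show g :: gs = [g] ++ gs from rfl, pvFoldl_append, ih]
    simp

theorem pvA_eq_alt (alleles : List (List String)) :
    ∀ cur : String, generate_variant_rules alleles cur = generate_variant_rules_alt alleles cur := by
  induction alleles with
  | nil => intro cur; rfl
  | cons first rest ih =>
    intro cur
    show first.foldl _ [] = _
    rw [PySem.List.foldl_append_eq_flatMap (g := fun allele =>
      generate_variant_rules rest (if cur ≠ "" then cur ++ "/" ++ allele else allele))]
    rw [pvAlt_eq_foldl, List.foldl_cons, pvFoldl_flatMap]
    show _ = (pvStep [cur] first).flatMap _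
    simp only [pvStep, List.flatMap_singleton, List.flatMap_map, List.nil_append]
    apply List.flatMap_congr
    intro allele _
    rw [ih]
    rfl

-- ===== VERDICT (by name: the statement is the Claim_ definition above) =====
theorem generate_variant_rules_spec : Claim_equal_generate_variant_rules := by
  intro alleles cur _
  exact pvA_eq_alt alleles cur
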